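-- pv_equiv track=rewrite | github.com/Whitthenstein/Advent_of_Code-Solutions | Solutions/python/2022/day_11.py | getMonkeysInfo
-- ===== SOURCE A (Python) =====
-- def getMonkeysInfo(linesList:list):
--     current = []
--     monkeys = []
--     for line in linesList:
--         line = line.replace("\n", "")
--         if line == "":
--             monkeys.append(current)
--             current = []
--         else:
--             current.append(line)
--
--     monkeys.append(current)
--
--     return monkeys
-- ===== SOURCE B (Python) =====
-- def getMonkeysInfo(linesList: list):
--     # Two stages: strip newlines up front, then recursively split the list at
--     # the first blank line (index + slices) instead of a forward accumulator loop.
--     stripped = [l.replace("\n", "") for l in linesList]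
--
--     def splitBlocks(ls):
--         if "" not in ls:
--             return [ls]
--         i = ls.index("")
--         return [ls[:i]] + splitBlocks(ls[i + 1:])
--
--     return splitBlocks(stripped)
-- ===== Notes on version B (the rewrite author's own statement) =====
-- stated objective: alternative
-- what changed: B strips newlines in a first pass and then recursively splits the list at the first blank line via index() and slicing, instead of A's single forward loop carrying a 'current' block flushed into 'monkeys'.
import Mathlib
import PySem

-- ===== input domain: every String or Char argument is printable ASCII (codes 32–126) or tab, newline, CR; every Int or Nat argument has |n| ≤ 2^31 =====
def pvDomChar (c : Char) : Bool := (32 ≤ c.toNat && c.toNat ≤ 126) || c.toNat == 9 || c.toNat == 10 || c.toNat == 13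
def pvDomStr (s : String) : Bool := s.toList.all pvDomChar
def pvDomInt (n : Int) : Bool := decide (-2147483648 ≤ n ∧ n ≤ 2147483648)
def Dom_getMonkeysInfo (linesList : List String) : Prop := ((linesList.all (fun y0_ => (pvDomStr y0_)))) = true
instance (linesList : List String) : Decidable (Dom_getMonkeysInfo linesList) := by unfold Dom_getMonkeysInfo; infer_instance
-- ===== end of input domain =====

-- B strips newlines in a first pass, then recursively splits at the first blank
-- line via index/slices, instead of A's forward accumulator-and-flush loop
-- (alternative decomposition, same result).


-- ===== PORT A =====
-- forward loop carrying (current, monkeys); blank line flushes current, final flush at the end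
def getMonkeysInfo (linesList : List String) : List (List String) :=
  let st := linesList.foldl
    (fun (st : List String × List (List String)) line =>
      let line := PySem.Str.replace line "\n" ""
      if line == "" then ([], st.2 ++ [st.1])
      else (st.1 ++ [line], st.2))
    ([], [])
  st.2 ++ [st.1]

-- ===== PORT B =====
-- recursive split at the first blank line: ls[:i] is one block, recurse on ls[i+1:]
def splitBlocks (ls : List String) : List (List String) :=
  match h : PySem.List.index? ls "" with
  | none => [ls]                           -- '"" not in ls'
  | some i =>
      PySem.List.slice ls none (some (i : Int))
        :: splitBlocks (PySem.List.slice ls (some ((i : Int) + 1)) none)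
termination_by ls.length
decreasing_by
  obtain ⟨hi, _, _⟩ := PySem.List.getElem_of_index?_eq_some h
  rw [show ((i : Int) + 1) = (((i + 1 : Nat)) : Int) by push_cast; ring,
    PySem.List.slice_from_natCast]
  simp only [List.length_drop]
  omega

def getMonkeysInfo_alt (linesList : List String) : List (List String) :=
  splitBlocks (linesList.map (fun l => PySem.Str.replace l "\n" ""))

-- ===== PRECONDITION & SPEC =====
def Spec_getMonkeysInfo (linesList : List String) (out : List (List String)) : Prop := out = getMonkeysInfo_alt linesList
instance (linesList : List String) (out : List (List String)) : Decidable (Spec_getMonkeysInfo linesList out) := by unfold Spec_getMonkeysInfo; infer_instance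

-- ===== CLAIM (what is proved, stated in full; the proofs are below) =====
def Claim_equal_getMonkeysInfo : Prop := ∀ (linesList : List String), Dom_getMonkeysInfo linesList → Spec_getMonkeysInfo linesList (getMonkeysInfo linesList)

-- ===== LEMMAS AND PROOFS =====

-- common specification: structural splitting of an already-stripped list
def splitSpec : List String → List (List String)
  | [] => [[]]
  | x :: xs =>
      if x = "" then [] :: splitSpec xs
      else (x :: (splitSpec xs).headD []) :: (splitSpec xs).tail

lemma splitSpec_ne_nil (l : List String) : splitSpec l ≠ [] := by
  induction l with
  | nil => simp [splitSpec]
  | cons x xs ih =>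
    simp only [splitSpec]
    split
    · simp
    · cases h : splitSpec xs with
      | nil => exact absurd h ih
      | cons b bs => simp

lemma splitSpec_no_blank (l : List String) (h : "" ∉ l) : splitSpec l = [l] := by
  induction l with
  | nil => rfl
  | cons x xs ih =>
    simp only [List.mem_cons, not_or] at h
    simp [splitSpec, Ne.symm h.1, ih h.2]

lemma splitSpec_append_blank (pre suf : List String) (h : "" ∉ pre) :
    splitSpec (pre ++ "" :: suf) = pre :: splitSpec suf := by
  induction pre with
  | nil => simp [splitSpec]
  | cons p ps ih =>
    simp only [List.mem_cons, not_or] at h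
    simp [splitSpec, Ne.symm h.1, ih h.2]

lemma splitBlocks_eq_splitSpec (ls : List String) : splitBlocks ls = splitSpec ls := by
  induction hls : ls.length using Nat.strong_induction_on generalizing ls with
  | _ n ih =>
    rw [splitBlocks]
    split
    · next h =>
      rw [splitSpec_no_blank ls (Iff.mp (PySem.List.index?_eq_none_iff ls "") h)]
    · next i h =>
      obtain ⟨pre, suf, hsplit, hlen, hnot⟩ := Iff.mp (PySem.List.index?_eq_some_iff ls "" i) h
      rw [show ((i : Int) + 1) = (((i + 1 : Nat)) : Int) by push_cast; ring,
        PySem.List.slice_from_natCast, PySem.List.slice_to_natCast]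
      subst hls hlen
      have htake : ls.take pre.length = pre := by
        rw [hsplit]; simp
      have hdrop : ls.drop (pre.length + 1) = suf := by
        rw [hsplit]; simp [List.drop_append]
      rw [htake, hdrop, hsplit, splitSpec_append_blank pre suf hnot,
        ih suf.length (by rw [hsplit]; simp; omega) suf rfl]

-- A's fold body as a named function (definitionally A's lambda)
def stepA (st : List String × List (List String)) (line : String) :
    List String × List (List String) :=
  let line := PySem.Str.replace line "\n" ""
  if line == "" then ([], st.2 ++ [st.1])
  else (st.1 ++ [line], st.2)

-- merge an accumulated current block into the front block
def mergeFirst (cur : List String) : List (List String) → List (List String)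
  | [] => [cur]
  | b :: bs => (cur ++ b) :: bs

-- A's fold over the raw lines equals splitSpec of the stripped lines
lemma foldA_eq (l : List String) (cur : List String) (acc : List (List String)) :
    (l.foldl stepA (cur, acc)).2 ++ [(l.foldl stepA (cur, acc)).1]
      = acc ++ mergeFirst cur (splitSpec (l.map (fun l => PySem.Str.replace l "\n" ""))) := by
  induction l generalizing cur acc with
  | nil => simp [splitSpec, mergeFirst]
  | cons x xs ih =>
    simp only [List.foldl_cons, List.map_cons, splitSpec, stepA]
    split
    · next h =>
      rw [beq_iff_eq] at h
      rw [ih, if_pos h]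
      cases hs : splitSpec (xs.map (fun l => PySem.Str.replace l "\n" "")) with
      | nil => exact absurd hs (splitSpec_ne_nil _)
      | cons b bs => simp [mergeFirst]
    · next h =>
      rw [beq_iff_eq] at h
      rw [ih, if_neg h]
      cases hs : splitSpec (xs.map (fun l => PySem.Str.replace l "\n" "")) with
      | nil => exact absurd hs (splitSpec_ne_nil _)
      | cons b bs => simp [mergeFirst]

-- ===== VERDICT (by name: the statement is the Claim_ definition above) =====
theorem getMonkeysInfo_spec : Claim_equal_getMonkeysInfo := by
  intro l _
  show getMonkeysInfo l = getMonkeysInfo_alt l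
  rw [getMonkeysInfo_alt, splitBlocks_eq_splitSpec]
  have hA : getMonkeysInfo l
      = (l.foldl stepA ([], [])).2 ++ [(l.foldl stepA ([], [])).1] := rfl
  rw [hA, foldA_eq]
  cases hh : splitSpec (l.map (fun l => PySem.Str.replace l "\n" "")) with
  | nil => exact absurd hh (splitSpec_ne_nil _)
  | cons b bs => simp [mergeFirst]
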